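-- pv_equiv track=rewrite | github.com/AirHorizons/CUTUBE | FaceCrop/generate_cropped_videos.py | closest_box
-- ===== SOURCE A (Python) =====
-- def closest_box(face, prev_faces, threshold=100):
--     # face = [x_min, y_min, x_max, y_max]
--     # prev_faces = {face_id: [x_min, y_min, x_max, y_max], ...}
--
--     close_faces_dist = {}
--
--     for face_id, prev_face in prev_faces.items():
--         dist = abs(face[0] - prev_face[0]) + abs(face[1] - prev_face[1]) + abs(face[2] - prev_face[2]) + abs(face[3] - prev_face[3])
--         if dist < threshold:
--             close_faces_dist[face_id] = dist
--
--     if not close_faces_dist: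
--         return None
--     else:
--         return min(close_faces_dist, key=close_faces_dist.get)
-- ===== SOURCE B (Python) =====
-- def closest_box(face, prev_faces, threshold=100):
--     # single pass: running best instead of building a dict of candidates and taking min
--     best_id = None
--     best_dist = None
--     for face_id, prev_face in prev_faces.items():
--         dist = abs(face[0] - prev_face[0]) + abs(face[1] - prev_face[1]) + abs(face[2] - prev_face[2]) + abs(face[3] - prev_face[3])
--         if dist < threshold and (best_dist is None or dist < best_dist):
--             best_id = face_id
--             best_dist = dist
--     return best_id
-- ===== Notes on version B (the rewrite author's own statement) =====
-- stated objective: simpler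
-- what changed: B replaces A's two-phase plan (build a dict of all faces within the threshold, then a second min pass keyed by dict lookup) with a single pass that keeps the running best id and distance, using strict '<' so the first minimum wins like min over an insertion-ordered dict.
import Mathlib
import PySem

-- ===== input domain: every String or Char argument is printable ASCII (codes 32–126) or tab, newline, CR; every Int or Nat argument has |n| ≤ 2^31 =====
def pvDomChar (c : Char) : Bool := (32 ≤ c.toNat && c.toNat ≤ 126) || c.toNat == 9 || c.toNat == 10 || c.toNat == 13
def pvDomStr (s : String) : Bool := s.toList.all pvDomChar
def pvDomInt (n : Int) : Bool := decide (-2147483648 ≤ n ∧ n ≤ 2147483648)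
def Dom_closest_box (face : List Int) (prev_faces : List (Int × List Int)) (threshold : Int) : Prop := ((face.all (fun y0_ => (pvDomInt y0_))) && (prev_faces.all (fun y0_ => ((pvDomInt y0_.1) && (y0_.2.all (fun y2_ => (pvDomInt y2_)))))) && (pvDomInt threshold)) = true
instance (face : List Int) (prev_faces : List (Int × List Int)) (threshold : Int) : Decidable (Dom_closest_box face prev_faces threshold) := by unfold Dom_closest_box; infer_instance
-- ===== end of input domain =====

-- B replaces A's dict-of-candidates-then-min with one pass keeping the running best (objective: simpler).

-- shared helper: the four-term Manhattan distance both Pythons compute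
def pvDist (face prev_face : List Int) : Int :=
  ((PySem.List.pyGetD face 0 0 - PySem.List.pyGetD prev_face 0 0).natAbs : Int)
  + ((PySem.List.pyGetD face 1 0 - PySem.List.pyGetD prev_face 1 0).natAbs : Int)
  + ((PySem.List.pyGetD face 2 0 - PySem.List.pyGetD prev_face 2 0).natAbs : Int)
  + ((PySem.List.pyGetD face 3 0 - PySem.List.pyGetD prev_face 3 0).natAbs : Int)

-- ===== PORT A =====
-- min(close_faces_dist, key=close_faces_dist.get): every key is present, so .get is getD with default 0
def closest_box (face : List Int) (prev_faces : List (Int × List Int)) (threshold : Int) : Option Int :=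
  let close := prev_faces.foldl
    (fun (d : PySem.Dict Int Int) p =>
      let dist := pvDist face p.2
      if dist < threshold then d.insert p.1 dist else d)
    PySem.Dict.empty
  if close.items = [] then none
  else PySem.List.min? close.keys (fun k => close.getD k 0)

-- ===== PORT B =====
def closestGo (face : List Int) (threshold : Int) :
    List (Int × List Int) → Option Int → Option Int → Option Int
  | [], best_id, _ => best_id
  | p :: rest, best_id, best_dist =>
    let dist := pvDist face p.2
    if dist < threshold ∧ (∀ bd, best_dist = some bd → dist < bd) then
      closestGo face threshold rest (some p.1) (some dist)
    else
      closestGo face threshold rest best_id best_dist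

def closest_box_alt (face : List Int) (prev_faces : List (Int × List Int)) (threshold : Int) : Option Int :=
  closestGo face threshold prev_faces none none

-- ===== PRECONDITION & SPEC =====
-- Pre_ excludes (a) inputs where Python A raises IndexError: a face of fewer than 4 coordinates
-- (only reachable when prev_faces is nonempty) or a previous face of fewer than 4 coordinates;
-- and (b) association lists with duplicate ids, which do not represent a Python dict (dict keys
-- are unique, duplicates collapse before either program runs).
def Pre_closest_box (face : List Int) (prev_faces : List (Int × List Int)) (threshold : Int) : Prop :=
  (prev_faces = [] ∨ 4 ≤ face.length) ∧ (∀ p ∈ prev_faces, 4 ≤ p.2.length) ∧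
    (prev_faces.map Prod.fst).Nodup
instance (face : List Int) (prev_faces : List (Int × List Int)) (threshold : Int) : Decidable (Pre_closest_box face prev_faces threshold) := by unfold Pre_closest_box; infer_instance

def pvWitness_closest_box : List Int × (List (Int × List Int)) × Int :=
  ([0, 0, 0, 0], [(1, [1, 2, 3, 4]), (2, [90, 0, 0, 0])], 100)

def Spec_closest_box (face : List Int) (prev_faces : List (Int × List Int)) (threshold : Int) (out : Option Int) : Prop := out = closest_box_alt face prev_faces threshold
instance (face : List Int) (prev_faces : List (Int × List Int)) (threshold : Int) (out : Option Int) : Decidable (Spec_closest_box face prev_faces threshold out) := by unfold Spec_closest_box; infer_instance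

-- ===== CLAIM (what is proved, stated in full; the proofs are below) =====
def Claim_equal_closest_box : Prop := ∀ (face : List Int) (prev_faces : List (Int × List Int)) (threshold : Int), Dom_closest_box face prev_faces threshold → Pre_closest_box face prev_faces threshold → Spec_closest_box face prev_faces threshold (closest_box face prev_faces threshold)

-- ===== LEMMAS AND PROOFS =====

-- the 'keep the smaller, first wins' selector both programs implement
def pvSel (acc : Option (Int × Int)) (p : Int × Int) : Option (Int × Int) :=
  match acc with
  | none => some p
  | some m => if p.2 < m.2 then some p else some m

-- the (id, distance) pairs that pass the threshold, in order
def pvPairs (face : List Int) (threshold : Int) (l : List (Int × List Int)) : List (Int × Int) :=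
  (l.filter (fun p => pvDist face p.2 < threshold)).map (fun p => (p.1, pvDist face p.2))

-- A's dict-building fold appends exactly the thresholded pairs when all ids are fresh
theorem items_fold (face : List Int) (threshold : Int) :
    ∀ (l : List (Int × List Int)) (d : PySem.Dict Int Int),
      (d.keys ++ l.map Prod.fst).Nodup →
      (l.foldl (fun (d : PySem.Dict Int Int) p =>
          let dist := pvDist face p.2
          if dist < threshold then d.insert p.1 dist else d) d).items
        = d.items ++ pvPairs face threshold l := by
  intro l
  induction l with
  | nil => intro d _; simp [pvPairs]
  | cons p rest ih =>
    intro d hnd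
    have hfresh : p.1 ∉ d.keys := by
      rw [List.nodup_append] at hnd
      intro hmem
      have := hnd.2.2
      simp at this
      exact (this p.1 hmem).1 rfl
    have hc : d.contains p.1 = false := by
      rw [← Bool.not_eq_true, PySem.Dict.contains_iff_mem_keys]
      exact hfresh
    by_cases hlt : pvDist face p.2 < threshold
    · have hstep : (if pvDist face p.2 < threshold then d.insert p.1 (pvDist face p.2) else d)
          = (⟨d.items ++ [(p.1, pvDist face p.2)]⟩ : PySem.Dict Int Int) := by
        rw [if_pos hlt]; simp [PySem.Dict.insert, hc]
      simp only [List.foldl_cons]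
      rw [hstep, ih ⟨d.items ++ [(p.1, pvDist face p.2)]⟩ ?_]
      · simp [pvPairs, hlt]
      · have hk : (⟨d.items ++ [(p.1, pvDist face p.2)]⟩ : PySem.Dict Int Int).keys
            = d.keys ++ [p.1] := by simp [PySem.Dict.keys]
        rw [hk, List.append_assoc]
        simpa [← List.append_cons] using hnd
    · have hstep : (if pvDist face p.2 < threshold then d.insert p.1 (pvDist face p.2) else d) = d := by
        rw [if_neg hlt]
      simp only [List.foldl_cons]
      rw [hstep, ih d ?_]
      · simp [pvPairs, hlt]
      · refine hnd.sublist ?_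
        exact (List.sublist_cons_self _ _).append_left _

-- lookup in a nodup association dict returns the stored distance
theorem getD_mk_mem :
    ∀ (c : List (Int × Int)), (c.map Prod.fst).Nodup →
      ∀ p ∈ c, (PySem.Dict.mk c).getD p.1 0 = p.2 := by
  intro c
  induction c with
  | nil => intro _ p hp; simp at hp
  | cons q rest ih =>
    intro hnd p hp
    rcases List.mem_cons.mp hp with h | h
    · subst h
      simp [PySem.Dict.getD, PySem.Dict.get?, List.find?]
    · have hq : q.1 ≠ p.1 := by
        intro he
        have : q.1 ∉ rest.map Prod.fst := (List.nodup_cons.mp (by simpa using hnd)).1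
        exact this (he ▸ List.mem_map_of_mem h)
      have : (q.1 == p.1) = false := by simpa using hq
      simp only [PySem.Dict.getD, PySem.Dict.get?, List.find?, this]
      exact ih (by simpa using hnd.of_cons) p h

-- min? over the keys, with the lookup as key, tracks the running best pair
-- (generic in the fold step F so it applies to min?'s internal fold)
theorem min_fold (g : Int → Int) (F : Option Int → Int → Option Int)
    (hnone : ∀ k, F none k = some k)
    (hsome : ∀ m k, F (some m) k = if g k < g m then some k else some m) :
    ∀ (c : List (Int × Int)) (b : Option (Int × Int)),
      (∀ p ∈ c, g p.1 = p.2) → (∀ m, b = some m → g m.1 = m.2) →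
      List.foldl F (b.map Prod.fst) (c.map Prod.fst)
      = (List.foldl pvSel b c).map Prod.fst := by
  intro c
  induction c with
  | nil => intro b _ _; simp
  | cons p rest ih =>
    intro b hg hb
    have hgp : g p.1 = p.2 := hg p (by simp)
    cases b with
    | none =>
      simp only [List.map_cons, List.foldl_cons, Option.map_none, hnone]
      exact ih (some p) (fun q hq => hg q (by simp [hq]))
        (fun m hm => by cases hm; exact hgp)
    | some m =>
      have hgm : g m.1 = m.2 := hb m rfl
      simp only [List.map_cons, List.foldl_cons, Option.map_some, hsome, pvSel, hgp, hgm]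
      by_cases hlt : p.2 < m.2
      · simp only [hlt, if_pos]
        exact ih (some p) (fun q hq => hg q (by simp [hq]))
          (fun x hx => by cases hx; exact hgp)
      · simp only [hlt, if_neg, not_false_iff]
        exact ih (some m) (fun q hq => hg q (by simp [hq]))
          (fun x hx => by cases hx; exact hgm)

-- B's loop is the running-best fold over the thresholded pairs
theorem go_fold (face : List Int) (threshold : Int) :
    ∀ (l : List (Int × List Int)) (b : Option (Int × Int)),
      closestGo face threshold l (b.map Prod.fst) (b.map Prod.snd)
        = (List.foldl pvSel b (pvPairs face threshold l)).map Prod.fst := by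
  intro l
  induction l with
  | nil => intro b; simp [closestGo, pvPairs]
  | cons p rest ih =>
    intro b
    by_cases hlt : pvDist face p.2 < threshold
    · have hpairs : pvPairs face threshold (p :: rest)
          = (p.1, pvDist face p.2) :: pvPairs face threshold rest := by
        simp [pvPairs, hlt]
      rw [hpairs]
      cases b with
      | none =>
        simp only [closestGo, Option.map_none]
        rw [if_pos ⟨hlt, by intro bd h; cases h⟩]
        simpa using ih (some (p.1, pvDist face p.2))
      | some m =>
        simp only [closestGo, Option.map_some, List.foldl_cons, pvSel]
        by_cases hbd : pvDist face p.2 < m.2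
        · rw [if_pos ⟨hlt, by intro bd h; cases h; exact hbd⟩, if_pos hbd]
          simpa using ih (some (p.1, pvDist face p.2))
        · rw [if_neg (by rintro ⟨-, h⟩; exact hbd (h m.2 rfl)), if_neg hbd]
          simpa using ih (some m)
    · have hpairs : pvPairs face threshold (p :: rest) = pvPairs face threshold rest := by
        simp [pvPairs, hlt]
      rw [hpairs]
      cases b with
      | none =>
        simp only [closestGo, Option.map_none]
        rw [if_neg (by rintro ⟨h, -⟩; exact hlt h)]
        simpa using ih none
      | some m =>
        simp only [closestGo, Option.map_some]
        rw [if_neg (by rintro ⟨h, -⟩; exact hlt h)]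
        simpa using ih (some m)

-- ===== VERDICT (by name: the statement is the Claim_ definition above) =====
theorem closest_box_spec : Claim_equal_closest_box := by
  intro face prev_faces threshold _ hpre
  obtain ⟨-, -, hnd⟩ := hpre
  unfold Spec_closest_box closest_box closest_box_alt
  set c := pvPairs face threshold prev_faces with hc
  have hitems : (prev_faces.foldl (fun (d : PySem.Dict Int Int) p =>
      let dist := pvDist face p.2
      if dist < threshold then d.insert p.1 dist else d) PySem.Dict.empty).items = c := by
    rw [items_fold face threshold prev_faces PySem.Dict.empty (by simpa [PySem.Dict.empty, PySem.Dict.keys] using hnd)]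
    simpa [PySem.Dict.empty] using hc.symm
  have hdict : (prev_faces.foldl (fun (d : PySem.Dict Int Int) p =>
      let dist := pvDist face p.2
      if dist < threshold then d.insert p.1 dist else d) PySem.Dict.empty) = PySem.Dict.mk c := by
    apply PySem.Dict.ext; simpa using hitems
  have hcnd : (c.map Prod.fst).Nodup := by
    have h1 : c.map Prod.fst
        = (prev_faces.filter (fun p => pvDist face p.2 < threshold)).map Prod.fst := by
      simp [hc, pvPairs, List.map_map, Function.comp]
    rw [h1]
    exact hnd.sublist (List.filter_sublist.map _)
  rw [hdict]
  have hB := go_fold face threshold prev_faces (none : Option (Int × Int))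
  simp only [Option.map_none] at hB
  rw [hB, ← hc]
  by_cases hce : (PySem.Dict.mk c).items = []
  · have : c = [] := by simpa using hce
    rw [if_pos hce, this]
    simp
  · rw [if_neg hce]
    have hkeys : (PySem.Dict.mk c).keys = c.map Prod.fst := by
      simp [PySem.Dict.keys]
    rw [PySem.List.min?, hkeys]
    exact min_fold (fun k => (PySem.Dict.mk c).getD k 0) _ (fun k => rfl) (fun m k => rfl)
      c none (fun p hp => getD_mk_mem c hcnd p hp) (fun m hm => by cases hm)
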